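-- pv_equiv track=rewrite | github.com/yashasurs/HPE-CPP-2026 | compression_pipeline/module1/parser/cleaner.py | remove_legal_blocks
-- ===== SOURCE A (Python) =====
-- def remove_legal_blocks(text):
--     lines = text.split("\n")
--     cleaned = []
--
--     skip = False
--
--     for line in lines:
--         l = line.lower()
--
--         if "confusion among customers" in l:
--             skip = True
--             continue
--
--         if skip:
--             # stop skipping after blank or heading
--             if not l.strip() or l.startswith("#"):
--                 skip = False
--             continue
--
--         cleaned.append(line)
--
--     return "\n".join(cleaned)
-- ===== SOURCE B (Python) =====
-- MARKER = "confusion among customers"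
--
--
-- def _is_terminator(line):
--     l = line.lower()
--     return not l.strip() or l.startswith("#")
--
--
-- def _block_len(block):
--     # number of leading lines still inside the legal block
--     n = 0
--     for line in block:
--         if MARKER in line.lower() or not _is_terminator(line):
--             n += 1
--         else:
--             break
--     return n
--
--
-- def remove_legal_blocks(text):
--     lines = text.split("\n")
--     n = len(lines)
--     # positions of the marker lines, found up front
--     markers = [i for i, line in enumerate(lines) if MARKER in line.lower()]
--     # half-open index ranges of the lines that are kept
--     ranges = []
--     start = 0
--     for m in markers:
--         if m >= start:
--             ranges.append((start, m))
--             start = m + 1 + _block_len(lines[m + 1:]) + 1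
--     ranges.append((start, n))
--     kept = []
--     for a, b in ranges:
--         kept.extend(lines[a:b])
--     return "\n".join(kept)
-- ===== Notes on version B (the rewrite author's own statement) =====
-- stated objective: alternative
-- what changed: Instead of A's single pass carrying a skip flag across lines, B first collects all marker-line positions with one comprehension, then folds over those positions computing half-open index ranges of kept lines (measuring each dropped block's length from a slice), and finally concatenates the slices for those ranges.
import Mathlib
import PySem

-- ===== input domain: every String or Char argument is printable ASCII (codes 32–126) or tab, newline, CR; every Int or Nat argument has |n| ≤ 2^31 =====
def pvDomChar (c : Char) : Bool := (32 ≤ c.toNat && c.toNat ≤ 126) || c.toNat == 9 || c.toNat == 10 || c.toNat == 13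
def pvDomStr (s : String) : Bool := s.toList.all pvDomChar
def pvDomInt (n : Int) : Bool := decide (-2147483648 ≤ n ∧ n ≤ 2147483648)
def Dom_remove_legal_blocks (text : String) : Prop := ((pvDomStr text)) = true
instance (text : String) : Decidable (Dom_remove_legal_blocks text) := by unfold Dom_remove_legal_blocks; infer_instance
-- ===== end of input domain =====

-- B replaces A's flag-carrying single pass by: collect marker positions, compute kept index ranges, concatenate slices; same output, same cost.

-- ===== PORT A =====
-- one iteration of A's for-loop over (cleaned, skip)
def pyA_step (st : List String × Bool) (line : String) : List String × Bool :=
  let l := PySem.Str.lower line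
  if PySem.Str.isIn "confusion among customers" l then (st.1, true)
  else if st.2 then
    if PySem.Str.strip l == "" || PySem.Str.startswith l "#" then (st.1, false) else (st.1, true)
  else (st.1 ++ [line], st.2)

def remove_legal_blocks (text : String) : String :=
  PySem.Str.join "\n" ((((PySem.Str.split? text "\n").getD []).foldl pyA_step ([], false)).1)

-- ===== PORT B =====
-- helpers of Source B
def pvIsMarker (line : String) : Bool :=
  PySem.Str.isIn "confusion among customers" (PySem.Str.lower line)

def pvIsTerm (line : String) : Bool :=
  let l := PySem.Str.lower line
  PySem.Str.strip l == "" || PySem.Str.startswith l "#"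

-- _block_len: the counting for-loop with break, as structural recursion on the slice
def pvBlockLen : List String → Int
  | [] => 0
  | line :: rest => if pvIsMarker line || !pvIsTerm line then pvBlockLen rest + 1 else 0

-- one iteration of Source B's 'for m in markers' loop over (ranges, start)
def pvRangesStep (lines : List String) (st : List (Int × Int) × Int) (m : Int) : List (Int × Int) × Int :=
  if m ≥ st.2 then
    (st.1 ++ [(st.2, m)], m + 1 + pvBlockLen (PySem.List.slice lines (some (m + 1)) none) + 1)
  else st

def remove_legal_blocks_alt (text : String) : String :=
  let lines := (PySem.Str.split? text "\n").getD []
  let n : Int := lines.length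
  let markers := ((PySem.List.enumerate lines).filter (fun p => pvIsMarker p.2)).map (·.1)
  let st := markers.foldl (pvRangesStep lines) ([], 0)
  let ranges := st.1 ++ [(st.2, n)]
  let kept := ranges.foldl (fun acc r => acc ++ PySem.List.slice lines (some r.1) (some r.2)) []
  PySem.Str.join "\n" kept

-- ===== PRECONDITION & SPEC =====
def Spec_remove_legal_blocks (text : String) (out : String) : Prop := out = remove_legal_blocks_alt text
instance (text : String) (out : String) : Decidable (Spec_remove_legal_blocks text out) := by unfold Spec_remove_legal_blocks; infer_instance

-- ===== CLAIM (what is proved, stated in full; the proofs are below) =====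
def Claim_equal_remove_legal_blocks : Prop := ∀ (text : String), Dom_remove_legal_blocks text → Spec_remove_legal_blocks text (remove_legal_blocks text)

-- ===== LEMMAS AND PROOFS =====

-- reference recursion (proof-only): the kept lines, characterised recursively
def pyB_skip : List String → List String
  | [] => []
  | line :: rest =>
    if pvIsMarker line then pyB_skip rest
    else if pvIsTerm line then rest
    else pyB_skip rest

theorem pyB_skip_length_le (l : List String) : (pyB_skip l).length ≤ l.length := by
  induction l with
  | nil => simp [pyB_skip]
  | cons line rest ih =>
    simp only [pyB_skip]
    split_ifs <;> simp <;> omega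

def pyB_go : List String → List String
  | [] => []
  | line :: rest =>
    if pvIsMarker line then pyB_go (pyB_skip rest)
    else line :: pyB_go rest
termination_by l => l.length
decreasing_by
  · have := pyB_skip_length_le rest; simp; omega
  · simp

-- ===== A = reference =====
theorem foldA_true_eq_skip (lines : List String) (acc : List String) :
    ((lines.foldl pyA_step (acc, true)).1 = ((pyB_skip lines).foldl pyA_step (acc, false)).1) := by
  induction lines generalizing acc with
  | nil => rfl
  | cons line rest ih =>
    simp only [List.foldl_cons, pyA_step, pyB_skip, pvIsMarker, pvIsTerm]
    split_ifs with h1 h2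
    · exact ih acc
    · rfl
    · exact ih acc

theorem foldA_false_eq_go (lines : List String) :
    ∀ acc : List String, ((lines.foldl pyA_step (acc, false)).1 = acc ++ pyB_go lines) := by
  induction lines using pyB_go.induct with
  | case1 => intro acc; simp [pyB_go]
  | case2 line rest h ih =>
    intro acc
    simp only [List.foldl_cons, pyA_step]
    rw [if_pos (show PySem.Str.isIn "confusion among customers" (PySem.Str.lower line) = true from h)]
    rw [pyB_go, if_pos h, foldA_true_eq_skip, ih]
  | case3 line rest h ih =>
    intro acc
    simp only [List.foldl_cons, pyA_step]
    rw [if_neg (show ¬ PySem.Str.isIn "confusion among customers" (PySem.Str.lower line) = true from h)]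
    simp only [Bool.false_eq_true, if_false]
    rw [pyB_go, if_neg h, ih]
    simp

-- ===== B = reference =====

theorem pvBlockLen_nonneg (l : List String) : 0 ≤ pvBlockLen l := by
  induction l with
  | nil => simp [pvBlockLen]
  | cons line rest ih => simp only [pvBlockLen]; split_ifs <;> omega

theorem pyB_skip_eq_drop (l : List String) :
    pyB_skip l = l.drop ((pvBlockLen l).toNat + 1) := by
  induction l with
  | nil => simp [pyB_skip, pvBlockLen]
  | cons line rest ih =>
    by_cases hm : pvIsMarker line = true
    · have hnn := pvBlockLen_nonneg rest
      rw [pyB_skip, if_pos hm, ih, pvBlockLen, if_pos (by simp [hm])]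
      have h1 : (pvBlockLen rest + 1).toNat = (pvBlockLen rest).toNat + 1 := by omega
      rw [h1, List.drop_succ_cons]
    · by_cases ht : pvIsTerm line = true
      · rw [pyB_skip, if_neg hm, if_pos ht, pvBlockLen, if_neg (by simp [hm, ht])]
        simp
      · have hnn := pvBlockLen_nonneg rest
        rw [pyB_skip, if_neg hm, if_neg ht, ih, pvBlockLen,
          if_pos (by simp [hm, ht])]
        have h1 : (pvBlockLen rest + 1).toNat = (pvBlockLen rest).toNat + 1 := by omega
        rw [h1, List.drop_succ_cons]

theorem pyB_go_append_of_no_marker (pre rest : List String)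
    (h : ∀ l ∈ pre, pvIsMarker l = false) :
    pyB_go (pre ++ rest) = pre ++ pyB_go rest := by
  induction pre with
  | nil => simp
  | cons x xs ih =>
    have hx := h x (by simp)
    rw [List.cons_append, pyB_go, if_neg (by simp [hx]), ih (fun l hl => h l (by simp [hl]))]
    simp

theorem pyB_go_of_no_marker (l : List String) (h : ∀ x ∈ l, pvIsMarker x = false) :
    pyB_go l = l := by
  have := pyB_go_append_of_no_marker l [] h
  simpa [pyB_go] using this

-- proof-mirror of Source B's fold over markers, as structural recursion
def pvK (lines : List String) : Int → List Int → List String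
  | s, [] => PySem.List.slice lines (some s) (some (lines.length : Int))
  | s, m :: ms =>
    if m ≥ s then
      PySem.List.slice lines (some s) (some m) ++
        pvK lines (m + 1 + pvBlockLen (PySem.List.slice lines (some (m + 1)) none) + 1) ms
    else pvK lines s ms

theorem fold_ranges_eq_pvK (lines : List String) (ms : List Int) :
    ∀ (rs : List (Int × Int)) (s : Int),
      ((ms.foldl (pvRangesStep lines) (rs, s)).1 ++ [((ms.foldl (pvRangesStep lines) (rs, s)).2, (lines.length : Int))]).flatMap
          (fun r => PySem.List.slice lines (some r.1) (some r.2))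
        = rs.flatMap (fun r => PySem.List.slice lines (some r.1) (some r.2)) ++ pvK lines s ms := by
  induction ms with
  | nil => intro rs s; simp [pvK]
  | cons m ms ih =>
    intro rs s
    simp only [List.foldl_cons, pvRangesStep, pvK]
    split_ifs with h
    · rw [ih]; simp
    · rw [ih]

-- main bridge: on a sorted, complete list of marker positions, pvK computes pyB_go of the suffix
theorem pvK_eq_pyB_go (lines : List String) (ms : List Int)
    (hsorted : ms.Pairwise (· < ·))
    (hmem : ∀ m ∈ ms, ∃ k : Nat, m = (k : Int) ∧ k < lines.length ∧ pvIsMarker (lines.getD k "") = true) :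
    ∀ s : Int, 0 ≤ s →
      (∀ k : Nat, (s ≤ (k : Int)) → k < lines.length → pvIsMarker (lines.getD k "") = true → (k : Int) ∈ ms) →
      pvK lines s ms = pyB_go (lines.drop s.toNat) := by
  induction ms with
  | nil =>
    intro s hs hcomp
    simp only [pvK]
    rw [PySem.List.slice_toNat _ hs (by positivity)]
    have hnone : ∀ x ∈ lines.drop s.toNat, pvIsMarker x = false := by
      intro x hx
      rw [List.mem_iff_getElem] at hx
      obtain ⟨i, hi, rfl⟩ := hx
      rw [List.getElem_drop]
      by_contra hcon
      have hlt : s.toNat + i < lines.length := by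
        have := List.length_drop (l := lines) (i := s.toNat); omega
      have := hcomp (s.toNat + i) (by omega) hlt
        (by rw [List.getD_eq_getElem _ _ hlt]; simpa using hcon)
      simp at this
    rw [pyB_go_of_no_marker _ hnone]
    have hlen : (lines.length : Int).toNat = lines.length := by simp
    rw [hlen, List.take_of_length_le (by simp)]
  | cons m ms ihm =>
    intro s hs hcomp
    obtain ⟨k, rfl, hk, hmk⟩ := hmem _ (by exact List.mem_cons_self)
    simp only [pvK]
    split_ifs with hge
    · -- the gap [s, k) is marker-free
      have hgap : ∀ j : Nat, s ≤ (j : Int) → j < k → pvIsMarker (lines.getD j "") = false := by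
        intro j hj1 hj2
        by_contra hcon
        have hjlt : j < lines.length := by omega
        have hmem' := hcomp j hj1 hjlt (by simpa using hcon)
        simp only [List.mem_cons] at hmem'
        rcases hmem' with h | h
        · have : j = k := by exact_mod_cast h
          omega
        · rw [List.pairwise_cons] at hsorted
          have := hsorted.1 _ h
          have : k < j := by exact_mod_cast this
          omega
      have hsk : s.toNat ≤ k := by omega
      rw [PySem.List.slice_toNat _ hs (by positivity)]
      have hktoNat : ((k : Int)).toNat = k := by simp
      rw [hktoNat]
      -- split the suffix at position k
      have hsplit : lines.drop s.toNat
          = (lines.drop s.toNat).take (k - s.toNat) ++ lines.drop k := by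
        have h1 : (lines.drop s.toNat).drop (k - s.toNat) = lines.drop k := by
          rw [List.drop_drop]
          congr 1; omega
        conv_lhs => rw [← List.take_append_drop (k - s.toNat) (lines.drop s.toNat)]
        rw [h1]
      have hpre : ∀ x ∈ (lines.drop s.toNat).take (k - s.toNat), pvIsMarker x = false := by
        intro x hx
        rw [List.mem_iff_getElem] at hx
        obtain ⟨i, hi, rfl⟩ := hx
        have hlt : i < min (k - s.toNat) (lines.drop s.toNat).length := by
          simpa [List.length_take] using hi
        have hdlen : (lines.drop s.toNat).length = lines.length - s.toNat := by simp
        rw [List.getElem_take, List.getElem_drop]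
        have := hgap (s.toNat + i) (by omega) (by omega)
        rw [List.getD_eq_getElem _ _ (by omega)] at this
        exact this
      conv_rhs => rw [hsplit]
      rw [pyB_go_append_of_no_marker _ _ hpre]
      congr 1
      -- now the marker line at k
      have hdropk : lines.drop k = lines[k] :: lines.drop (k + 1) :=
        (List.drop_eq_getElem_cons hk)
      rw [hdropk, pyB_go, if_pos (by rw [List.getD_eq_getElem _ _ hk] at hmk; exact hmk)]
      rw [pyB_skip_eq_drop, List.drop_drop]
      -- identify the new start
      have hslice : PySem.List.slice lines (some ((k : Int) + 1)) none = lines.drop (k + 1) := by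
        have h1 : ((k : Int) + 1).toNat = k + 1 := by omega
        rw [PySem.List.slice_from _ (by positivity), h1]
      have hbnn := pvBlockLen_nonneg (lines.drop (k + 1))
      have hcomp' : ∀ j : Nat,
          ((k : Int) + 1 + pvBlockLen (PySem.List.slice lines (some ((k : Int) + 1)) none) + 1) ≤ (j : Int) →
          j < lines.length → pvIsMarker (lines.getD j "") = true → (j : Int) ∈ ms := by
        intro j hj hjlt hjm
        rw [hslice] at hj
        have hin := hcomp j (by omega) hjlt hjm
        simp only [List.mem_cons] at hin
        rcases hin with h | h
        · have : j = k := by exact_mod_cast h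
          omega
        · exact h
      rw [List.pairwise_cons] at hsorted
      rw [ihm hsorted.2 (fun x hx => hmem x (List.mem_cons_of_mem _ hx)) _
        (by rw [hslice]; omega) hcomp']
      have hs' : ((k : Int) + 1 + pvBlockLen (PySem.List.slice lines (some ((k : Int) + 1)) none) + 1).toNat
          = k + 1 + ((pvBlockLen (lines.drop (k + 1))).toNat + 1) := by
        rw [hslice]; omega
      rw [hs']
    · -- m < s: marker inside an already dropped block; skipped by the guard
      rw [List.pairwise_cons] at hsorted
      apply ihm hsorted.2 (fun x hx => hmem x (List.mem_cons_of_mem _ hx)) s hs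
      intro j hj hjlt hjm
      have := hcomp j hj hjlt hjm
      simp only [List.mem_cons] at this
      rcases this with h | h
      · have : j = k := by exact_mod_cast h
        omega
      · exact h

-- properties of Source B's marker list
theorem markers_sorted (lines : List String) :
    (((PySem.List.enumerate lines).filter (fun p => pvIsMarker p.2)).map (·.1)).Pairwise (· < ·) := by
  rw [List.pairwise_map]
  exact (PySem.List.pairwise_lt_enumerate lines 0).filter _

theorem markers_mem (lines : List String) (m : Int)
    (hm : m ∈ ((PySem.List.enumerate lines).filter (fun p => pvIsMarker p.2)).map (·.1)) :
    ∃ k : Nat, m = (k : Int) ∧ k < lines.length ∧ pvIsMarker (lines.getD k "") = true := by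
  rw [List.mem_map] at hm
  obtain ⟨p, hp, rfl⟩ := hm
  rw [List.mem_filter] at hp
  obtain ⟨hpe, hpm⟩ := hp
  rw [PySem.List.mem_enumerate_iff] at hpe
  obtain ⟨k, hk, rfl⟩ := hpe
  exact ⟨k, by simp, hk, by rw [List.getD_eq_getElem _ _ hk]; simpa using hpm⟩

theorem markers_complete (lines : List String) (k : Nat) (hk : k < lines.length)
    (hm : pvIsMarker (lines.getD k "") = true) :
    (k : Int) ∈ ((PySem.List.enumerate lines).filter (fun p => pvIsMarker p.2)).map (·.1) := by
  rw [List.mem_map]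
  refine ⟨((k : Int), lines[k]), ?_, by simp⟩
  rw [List.mem_filter]
  constructor
  · rw [PySem.List.mem_enumerate_iff]
    exact ⟨k, hk, by simp⟩
  · rw [List.getD_eq_getElem _ _ hk] at hm
    simpa using hm

-- ===== VERDICT (by name: the statement is the Claim_ definition above) =====
theorem remove_legal_blocks_spec : Claim_equal_remove_legal_blocks := by
  intro text _
  unfold Spec_remove_legal_blocks remove_legal_blocks remove_legal_blocks_alt
  rw [foldA_false_eq_go]
  simp only []
  rw [PySem.List.foldl_append_eq_flatMap]
  rw [fold_ranges_eq_pvK]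
  rw [pvK_eq_pyB_go _ _ (markers_sorted _) (markers_mem _)
    0 le_rfl (fun k _ hk hm => markers_complete _ k hk hm)]
  simp
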